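-- pv_equiv track=rewrite | github.com/papi656/HackScripts | script.py | correct_name
-- ===== SOURCE A (Python) =====
-- def correct_name(name):
--     newName = ""
--     i = 0
--     while i < len(name):
--         if name[i] == '%':
--             newName = newName + '_'
--             i = i + 3
--         else:
--             newName = newName + name[i]
--             i = i + 1
--     return newName
-- ===== SOURCE B (Python) =====
-- import re
--
-- def correct_name(name):
--     # One-call regex substitution: each '%' plus up to two following chars
--     # (any chars, incl. newline) collapses to a single '_'.
--     return re.sub(r'%.{0,2}', '_', name, flags=re.DOTALL)
-- ===== Notes on version B (the rewrite author's own statement) =====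
-- stated objective: idiomatic
-- what changed: Replaced the manual index-arithmetic while loop (skip 3 positions on a percent sign, copy otherwise) by a single regex substitution collapsing each percent sign plus up to two following characters to an underscore.
import Mathlib
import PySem

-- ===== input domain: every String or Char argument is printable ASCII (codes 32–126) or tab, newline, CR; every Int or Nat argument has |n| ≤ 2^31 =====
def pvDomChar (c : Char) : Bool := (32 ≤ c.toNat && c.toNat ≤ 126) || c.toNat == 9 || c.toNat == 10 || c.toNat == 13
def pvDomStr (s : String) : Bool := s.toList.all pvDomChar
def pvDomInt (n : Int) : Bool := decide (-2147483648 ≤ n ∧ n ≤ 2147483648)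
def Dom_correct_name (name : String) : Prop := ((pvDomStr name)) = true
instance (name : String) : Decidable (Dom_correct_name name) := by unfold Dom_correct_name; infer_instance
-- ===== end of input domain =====

-- B replaces A's manual index loop by a single regex substitution ('%' plus up to
-- two following chars → '_'); the objective is a simpler, idiomatic one-liner.


-- ===== PORT A =====
-- A's while loop: index i advances by 3 past a '%' (appending '_'), else by 1
def correctNameLoop (cs : List Char) (i : Nat) (acc : String) : String :=
  if h : i < cs.length then
    if cs[i] = '%' then
      correctNameLoop cs (i + 3) (acc ++ "_")
    else
      correctNameLoop cs (i + 1) (acc.push cs[i])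
  else acc
termination_by cs.length - i

def correct_name (name : String) : String :=
  correctNameLoop name.toList 0 ""

-- ===== PORT B =====
-- port of Source B's re.sub(r'%.{0,2}', '_', name, flags=re.DOTALL): each match
-- consumes '%' plus up to two following chars and is replaced by '_'
def regexSub : List Char → List Char
  | [] => []
  | c :: rest =>
    if c = '%' then '_' :: regexSub (rest.drop 2)
    else c :: regexSub rest
termination_by cs => cs.length
decreasing_by
  all_goals (simp; try omega)

def correct_name_alt (name : String) : String :=
  String.ofList (regexSub name.toList)

-- ===== PRECONDITION & SPEC =====
def Spec_correct_name (name : String) (out : String) : Prop := out = correct_name_alt name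
instance (name : String) (out : String) : Decidable (Spec_correct_name name out) := by unfold Spec_correct_name; infer_instance

-- ===== CLAIM (what is proved, stated in full; the proofs are below) =====
def Claim_equal_correct_name : Prop := ∀ (name : String), Dom_correct_name name → Spec_correct_name name (correct_name name)

-- ===== LEMMAS AND PROOFS =====
theorem correctNameLoop_eq (cs : List Char) (i : Nat) (acc : String) :
    correctNameLoop cs i acc = acc ++ String.ofList (regexSub (cs.drop i)) := by
  fun_induction correctNameLoop cs i acc with
  | case1 i acc h hpc ih =>
      rw [ih]
      have hd : cs.drop i = cs[i] :: cs.drop (i + 1) := List.drop_eq_getElem_cons h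
      rw [hd, regexSub, if_pos hpc]
      have : (cs.drop (i + 1)).drop 2 = cs.drop (i + 3) := by
        rw [List.drop_drop]
      rw [this]
      apply String.ext
      simp
  | case2 i acc h hpc ih =>
      rw [ih]
      have hd : cs.drop i = cs[i] :: cs.drop (i + 1) := List.drop_eq_getElem_cons h
      rw [hd, regexSub, if_neg hpc]
      apply String.ext
      simp
  | case3 i acc h =>
      have : cs.drop i = [] := List.drop_eq_nil_of_le (by omega)
      rw [this]
      apply String.ext
      simp [regexSub]

-- ===== VERDICT (by name: the statement is the Claim_ definition above) =====
theorem correct_name_spec : Claim_equal_correct_name := by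
  intro name _
  unfold Spec_correct_name correct_name correct_name_alt
  rw [correctNameLoop_eq]
  apply String.ext
  simp
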